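-- pv_equiv track=rewrite | github.com/Dimitrool/reversi-bot | Players/mnmx4_cntp.py | repaint_the_cells
-- ===== SOURCE A (Python) =====
-- def repaint_the_cells(board, y, x, p1_color, p2_color):
--     # Repaints p2_color cells in p1_color after obtaining a cell with coordinates (x, y)
--     direction_y = [1, 1, 0, -1, -1, -1,  0,  1] # 1 - lower, -1 - higher
--     direction_x = [0, 1, 1,  1,  0, -1, -1, -1] # 1 - right, -1 - left
--     for condition in range(8):
--         repainting_is_valid = 0
--         for depth in range(8):
--             new_y = y + depth * direction_y[condition]
--             new_x = x + depth * direction_x[condition]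
--             if (-1 < new_x < 8) and (-1 < new_y < 8):
--                 if board[new_y][new_x] == p2_color:
--                     # we need to cover at least one opponent's cell to make a move
--                     repainting_is_valid = 1
--                 elif board[new_y][new_x] == p1_color and repainting_is_valid == 1:
--                     # Go back and repaint all the cells
--                     for hight in range(depth - 1, 0, -1):
--                         new_y = y + hight * direction_y[condition]
--                         new_x = x + hight * direction_x[condition]
--                         if board[new_y][new_x] == p2_color:
--                             board[new_y][new_x] = p1_color
--                     break
--                 elif depth == 0:
--                     board[new_y][new_x] = p1_color
--                 else:
--                     # There is no valid move in this direction
--                     break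
--             else:
--                 # out of board, change direction
--                 break
--     return board
-- ===== SOURCE B (Python) =====
-- def repaint_the_cells(board, y, x, p1_color, p2_color):
--     # Per direction, collect opponent coordinates forward in to_flip and flip them
--     # on meeting an own disc, instead of a validity flag plus a backward
--     # recomputation pass. Mutates `board` in place and returns it.
--     if 0 <= y < 8 and 0 <= x < 8:
--         board[y][x] = p1_color
--         for dy, dx in ((1, 0), (1, 1), (0, 1), (-1, 1), (-1, 0), (-1, -1), (0, -1), (1, -1)):
--             to_flip = []
--             for d in range(1, 8):
--                 ny, nx = y + d * dy, x + d * dx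
--                 if not (0 <= ny < 8 and 0 <= nx < 8):
--                     break
--                 cell = board[ny][nx]
--                 if cell == p2_color:
--                     to_flip.append((ny, nx))
--                 elif cell == p1_color and to_flip:
--                     for fy, fx in to_flip:
--                         board[fy][fx] = p1_color
--                     break
--                 else:
--                     break
--     return board
-- ===== Notes on version B (the rewrite author's own statement) =====
-- stated objective: simpler
-- what changed: B paints the placed square once up front and, per direction, accumulates opponent coordinates forward in a to_flip list flipped on meeting an own disc, replacing A's validity flag plus backward coordinate-recomputation pass (range(depth-1,0,-1)); Pre_ excludes boards smaller than 8x8 with the placed square on the grid, where A's hard-coded 0..7 scan raises IndexError (or happens to return after reading only existing cells, where the programs agree).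
-- intended difference: When the placed square (on the 0..7 grid) already holds p2_color and p1_color != p2_color, A leaves that square as p2_color because its depth-0 branch only paints an unoccupied-by-opponent square, while B paints it p1_color as placing a disc should; all other cells agree. — e.g. on repaint_the_cells(([[0, 0, 0, 0, 0, 0, 0, 0], [0, 0, 0, 0, 0, 0, 0, 0], [0, 0, 0, 0, 0, 0, 0, 0], [0, 0, 0, 2, 0, 0, 0, 0], [0, 0, 0, 0, …): A returns [[0, 0, 0, 0, 0, 0, 0, 0], [0, 0, 0, 0, 0, 0, 0, 0], [0, 0, 0, 0, 0, 0, 0, 0], [0, 0, 0, 2, 0, 0, 0, 0], [0, 0, 0, 0, 0…, B returns [[0, 0, 0, 0, 0, 0, 0, 0], [0, 0, 0, 0, 0, 0, 0, 0], [0, 0, 0, 0, 0, 0, 0, 0], [0, 0, 0, 1, 0, 0, 0, 0], [0, 0, 0, 0, 0…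
import Mathlib
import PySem

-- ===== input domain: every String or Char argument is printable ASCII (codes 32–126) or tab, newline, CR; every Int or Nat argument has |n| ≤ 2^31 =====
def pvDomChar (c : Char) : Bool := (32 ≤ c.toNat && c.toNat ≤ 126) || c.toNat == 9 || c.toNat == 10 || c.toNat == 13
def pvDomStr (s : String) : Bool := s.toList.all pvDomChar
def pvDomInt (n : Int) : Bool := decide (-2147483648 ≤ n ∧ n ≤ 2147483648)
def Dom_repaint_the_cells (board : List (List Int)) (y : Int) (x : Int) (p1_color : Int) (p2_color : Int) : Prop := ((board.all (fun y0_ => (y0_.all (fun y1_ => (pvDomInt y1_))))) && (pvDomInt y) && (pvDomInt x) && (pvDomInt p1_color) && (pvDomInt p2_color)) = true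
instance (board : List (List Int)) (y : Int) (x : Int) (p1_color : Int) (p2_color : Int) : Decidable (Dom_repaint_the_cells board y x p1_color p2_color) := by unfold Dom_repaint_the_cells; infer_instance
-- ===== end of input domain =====

-- B replaces A's per-direction validity flag and backward coordinate-recomputation pass by one
-- up-front paint of the placed square plus a forward-accumulated list of coordinates to flip
-- (objective: simpler). Both Pythons mutate `board` in place and return it; the equivalence
-- proved is about the return value.

-- ===== PORT A =====
-- shared 2-d indexers; exact for 0 ≤ r,c < 8 on an 8×8 board, the only way either port uses them
-- (both ports guard every access with the 0..7 range test, and Pre_ makes the board 8×8)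
def pvGet2 (b : List (List Int)) (r c : Int) : Int := (b.getD r.toNat []).getD c.toNat 0
def pvSet2 (b : List (List Int)) (r c v : Int) : List (List Int) :=
  b.set r.toNat ((b.getD r.toNat []).set c.toNat v)

def pvDirY : List Int := [1, 1, 0, -1, -1, -1, 0, 1]
def pvDirX : List Int := [0, 1, 1, 1, 0, -1, -1, -1]

-- the inner 'go back and repaint' pass: for hight in range(depth-1, 0, -1)
def pvBackA (y x dy dx p1 p2 : Int) (b : List (List Int)) (hs : List Int) : List (List Int) :=
  hs.foldl (fun b h =>
    if pvGet2 b (y + h * dy) (x + h * dx) = p2 then pvSet2 b (y + h * dy) (x + h * dx) p1 else b) b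

-- the inner 'for depth in range(8)' loop with its breaks, state = (repainting_is_valid, board)
def pvInnerA (y x dy dx p1 p2 : Int) : List Int → Int → List (List Int) → List (List Int)
  | [], _, b => b
  | d :: rest, valid, b =>
    if ((-1 < x + d * dx ∧ x + d * dx < 8) ∧ (-1 < y + d * dy ∧ y + d * dy < 8)) then
      if pvGet2 b (y + d * dy) (x + d * dx) = p2 then
        pvInnerA y x dy dx p1 p2 rest 1 b
      else if pvGet2 b (y + d * dy) (x + d * dx) = p1 ∧ valid = 1 then
        pvBackA y x dy dx p1 p2 b (PySem.List.pyRange (d - 1) 0 (-1))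
      else if d = 0 then
        pvInnerA y x dy dx p1 p2 rest valid (pvSet2 b (y + d * dy) (x + d * dx) p1)
      else b
    else b

def repaint_the_cells (board : List (List Int)) (y : Int) (x : Int) (p1_color : Int) (p2_color : Int) : List (List Int) :=
  (PySem.List.pyRange 0 8 1).foldl (fun b cond =>
    pvInnerA y x (PySem.List.pyGetD pvDirY cond 0) (PySem.List.pyGetD pvDirX cond 0) p1_color p2_color
      (PySem.List.pyRange 0 8 1) 0 b) board

-- ===== PORT B =====
def pvDirs : List (Int × Int) := [(1, 0), (1, 1), (0, 1), (-1, 1), (-1, 0), (-1, -1), (0, -1), (1, -1)]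

-- forward scan of one direction: returns the coordinates to flip (to_flip), or [] if nothing is captured
def pvScanB (b : List (List Int)) (y x dy dx p1 p2 : Int) : List (Int × Int) → List Int → List (Int × Int)
  | _, [] => []
  | toFlip, d :: rest =>
    if (0 ≤ y + d * dy ∧ y + d * dy < 8) ∧ (0 ≤ x + d * dx ∧ x + d * dx < 8) then
      if pvGet2 b (y + d * dy) (x + d * dx) = p2 then
        pvScanB b y x dy dx p1 p2 (toFlip ++ [(y + d * dy, x + d * dx)]) rest
      else if pvGet2 b (y + d * dy) (x + d * dx) = p1 ∧ toFlip ≠ [] then toFlip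
      else []
    else []

def pvFlip (p1 : Int) (b : List (List Int)) (fs : List (Int × Int)) : List (List Int) :=
  fs.foldl (fun b rc => pvSet2 b rc.1 rc.2 p1) b

def repaint_the_cells_alt (board : List (List Int)) (y : Int) (x : Int) (p1_color : Int) (p2_color : Int) : List (List Int) :=
  if (0 ≤ y ∧ y < 8) ∧ (0 ≤ x ∧ x < 8) then
    pvDirs.foldl (fun b dd =>
      pvFlip p1_color b (pvScanB b y x dd.1 dd.2 p1_color p2_color [] (PySem.List.pyRange 1 8 1)))
      (pvSet2 board y x p1_color)
  else board

-- ===== PRECONDITION & SPEC =====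
-- Pre_ requires the board to be 8×8 whenever the placed cell (y, x) is on the 0..7 grid (off the
-- grid every direction breaks at depth 0 and the board shape is never touched): A hard-codes the
-- 0..7 bounds and raises IndexError on a smaller board as soon as the scan reads a missing cell;
-- this also excludes some smaller boards on which A happens to return because every direction
-- breaks on a cell value before leaving the board — there A and B read the same cells and agree
-- (see the cite).
def Pre_repaint_the_cells (board : List (List Int)) (y : Int) (x : Int) (p1_color : Int) (p2_color : Int) : Prop :=
  ((0 ≤ y ∧ y < 8) ∧ (0 ≤ x ∧ x < 8)) → (board.length = 8 ∧ ∀ row ∈ board, row.length = 8)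
instance (board : List (List Int)) (y : Int) (x : Int) (p1_color : Int) (p2_color : Int) : Decidable (Pre_repaint_the_cells board y x p1_color p2_color) := by unfold Pre_repaint_the_cells; infer_instance

def pvWitness_repaint_the_cells : List (List Int) × Int × Int × Int × Int :=
  (List.replicate 8 (List.replicate 8 0), 3, 3, 1, 2)

-- When the placed square (on the 0..7 grid) already holds p2_color and p1_color ≠ p2_color, A
-- leaves that square as p2_color (its depth-0 branch only paints a square not held by the
-- opponent), while B paints it p1_color as placing a disc should; all other cells agree.
def D_repaint_the_cells (board : List (List Int)) (y : Int) (x : Int) (p1_color : Int) (p2_color : Int) : Prop :=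
  0 ≤ y ∧ y ≤ 7 ∧ 0 ≤ x ∧ x ≤ 7 ∧ p1_color ≠ p2_color ∧
    (board[y.toNat]?.bind fun row => row[x.toNat]?) = some p2_color
instance (board : List (List Int)) (y : Int) (x : Int) (p1_color : Int) (p2_color : Int) : Decidable (D_repaint_the_cells board y x p1_color p2_color) := by unfold D_repaint_the_cells; infer_instance

def Spec_repaint_the_cells (board : List (List Int)) (y : Int) (x : Int) (p1_color : Int) (p2_color : Int) (out : List (List Int)) : Prop := ¬ D_repaint_the_cells board y x p1_color p2_color → out = repaint_the_cells_alt board y x p1_color p2_color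
instance (board : List (List Int)) (y : Int) (x : Int) (p1_color : Int) (p2_color : Int) (out : List (List Int)) : Decidable (Spec_repaint_the_cells board y x p1_color p2_color out) := by unfold Spec_repaint_the_cells; infer_instance

def pvDiffWitness_repaint_the_cells : List (List Int) × Int × Int × Int × Int :=
  ([[0, 0, 0, 0, 0, 0, 0, 0], [0, 0, 0, 0, 0, 0, 0, 0], [0, 0, 0, 0, 0, 0, 0, 0],
    [0, 0, 0, 2, 0, 0, 0, 0], [0, 0, 0, 0, 0, 0, 0, 0], [0, 0, 0, 0, 0, 0, 0, 0],
    [0, 0, 0, 0, 0, 0, 0, 0], [0, 0, 0, 0, 0, 0, 0, 0]], 3, 3, 1, 2)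

def pvDiffWitnessOut_repaint_the_cells : (List (List Int)) × (List (List Int)) :=
  ([[0, 0, 0, 0, 0, 0, 0, 0], [0, 0, 0, 0, 0, 0, 0, 0], [0, 0, 0, 0, 0, 0, 0, 0],
    [0, 0, 0, 2, 0, 0, 0, 0], [0, 0, 0, 0, 0, 0, 0, 0], [0, 0, 0, 0, 0, 0, 0, 0],
    [0, 0, 0, 0, 0, 0, 0, 0], [0, 0, 0, 0, 0, 0, 0, 0]],
   [[0, 0, 0, 0, 0, 0, 0, 0], [0, 0, 0, 0, 0, 0, 0, 0], [0, 0, 0, 0, 0, 0, 0, 0],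
    [0, 0, 0, 1, 0, 0, 0, 0], [0, 0, 0, 0, 0, 0, 0, 0], [0, 0, 0, 0, 0, 0, 0, 0],
    [0, 0, 0, 0, 0, 0, 0, 0], [0, 0, 0, 0, 0, 0, 0, 0]])

-- ===== CLAIM (what is proved, stated in full; the proofs are below) =====
def Claim_unchanged_repaint_the_cells : Prop := ∀ (board : List (List Int)) (y : Int) (x : Int) (p1_color : Int) (p2_color : Int), Dom_repaint_the_cells board y x p1_color p2_color → Pre_repaint_the_cells board y x p1_color p2_color → Spec_repaint_the_cells board y x p1_color p2_color (repaint_the_cells board y x p1_color p2_color)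
def Claim_changed_repaint_the_cells : Prop := Dom_repaint_the_cells (pvDiffWitness_repaint_the_cells.1) (pvDiffWitness_repaint_the_cells.2.1) (pvDiffWitness_repaint_the_cells.2.2.1) (pvDiffWitness_repaint_the_cells.2.2.2.1) (pvDiffWitness_repaint_the_cells.2.2.2.2) ∧ Pre_repaint_the_cells (pvDiffWitness_repaint_the_cells.1) (pvDiffWitness_repaint_the_cells.2.1) (pvDiffWitness_repaint_the_cells.2.2.1) (pvDiffWitness_repaint_the_cells.2.2.2.1) (pvDiffWitness_repaint_the_cells.2.2.2.2) ∧ D_repaint_the_cells (pvDiffWitness_repaint_the_cells.1) (pvDiffWitness_repaint_the_cells.2.1) (pvDiffWitness_repaint_the_cells.2.2.1) (pvDiffWitness_repaint_the_cells.2.2.2.1) (pvDiffWitness_repaint_the_cells.2.2.2.2) ∧ repaint_the_cells (pvDiffWitness_repaint_the_cells.1) (pvDiffWitness_repaint_the_cells.2.1) (pvDiffWitness_repaint_the_cells.2.2.1) (pvDiffWitness_repaint_the_cells.2.2.2.1) (pvDiffWitness_repaint_the_cells.2.2.2.2) = pvDiffWitnessOut_repaint_the_cells.1 ∧ repaint_the_cells_alt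 (pvDiffWitness_repaint_the_cells.1) (pvDiffWitness_repaint_the_cells.2.1) (pvDiffWitness_repaint_the_cells.2.2.1) (pvDiffWitness_repaint_the_cells.2.2.2.1) (pvDiffWitness_repaint_the_cells.2.2.2.2) = pvDiffWitnessOut_repaint_the_cells.2 ∧ pvDiffWitnessOut_repaint_the_cells.1 ≠ pvDiffWitnessOut_repaint_the_cells.2
def Claim_exact_repaint_the_cells : Prop := ∀ (board : List (List Int)) (y : Int) (x : Int) (p1_color : Int) (p2_color : Int), Dom_repaint_the_cells board y x p1_color p2_color → Pre_repaint_the_cells board y x p1_color p2_color → D_repaint_the_cells board y x p1_color p2_color → repaint_the_cells board y x p1_color p2_color ≠ repaint_the_cells_alt board y x p1_color p2_color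

-- ===== LEMMAS AND PROOFS =====

-- board shape: an 8×8 grid (getD-phrased, convenient for set/get lemmas)
def pvShape (b : List (List Int)) : Prop :=
  b.length = 8 ∧ ∀ i : Nat, i < 8 → (b.getD i []).length = 8

theorem pvShape_of_pre (board : List (List Int))
    (h : board.length = 8 ∧ ∀ row ∈ board, row.length = 8) : pvShape board := by
  refine ⟨h.1, fun i hi => ?_⟩
  have hi' : i < board.length := by omega
  rw [List.getD_eq_getElem?_getD, List.getElem?_eq_getElem hi']
  exact h.2 _ (List.getElem_mem hi')

theorem pv_getD_set_self {α : Type} (l : List α) (i : Nat) (a d : α) (h : i < l.length) :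
    (l.set i a).getD i d = a := by
  rw [List.getD_eq_getElem?_getD, List.getElem?_set_self h, Option.getD_some]

theorem pv_getD_set_ne {α : Type} (l : List α) (i j : Nat) (a d : α) (h : i ≠ j) :
    (l.set i a).getD j d = l.getD j d := by
  rw [List.getD_eq_getElem?_getD, List.getElem?_set_ne h, ← List.getD_eq_getElem?_getD]

theorem pv_set_same {α : Type} (l : List α) (i : Nat) (a : α)
    (h : (l.getD i a) = a) : l.set i a = l := by
  by_cases hl : i < l.length
  · apply List.ext_getElem?
    intro j
    by_cases hij : i = j
    · subst hij
      rw [List.getElem?_set_self hl, List.getElem?_eq_getElem hl]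
      rw [List.getD_eq_getElem?_getD, List.getElem?_eq_getElem hl, Option.getD_some] at h
      rw [h]
    · rw [List.getElem?_set_ne hij]
  · rw [List.set_eq_of_length_le (by omega)]

theorem pv_get2_set2_ne (b : List (List Int)) (r c r' c' v : Int)
    (h : r.toNat ≠ r'.toNat ∨ c.toNat ≠ c'.toNat) :
    pvGet2 (pvSet2 b r c v) r' c' = pvGet2 b r' c' := by
  unfold pvGet2 pvSet2
  by_cases hr : r.toNat = r'.toNat
  · have hc : c.toNat ≠ c'.toNat := by tauto
    rw [hr]
    by_cases hl : r'.toNat < b.length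
    · rw [pv_getD_set_self _ _ _ _ hl, pv_getD_set_ne _ _ _ _ _ hc]
    · rw [List.set_eq_of_length_le (by omega)]
  · rw [pv_getD_set_ne _ _ _ _ _ hr]

theorem pv_get2_set2_self (b : List (List Int)) (r c v : Int)
    (hr : r.toNat < b.length) (hc : c.toNat < (b.getD r.toNat []).length) :
    pvGet2 (pvSet2 b r c v) r c = v := by
  unfold pvGet2 pvSet2
  rw [pv_getD_set_self _ _ _ _ hr, pv_getD_set_self _ _ _ _ hc]

theorem pv_set2_same (b : List (List Int)) (r c v : Int)
    (hv : pvGet2 b r c = v) : pvSet2 b r c v = b := by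
  unfold pvGet2 at hv
  unfold pvSet2
  have hrow : (b.getD r.toNat []).set c.toNat v = b.getD r.toNat [] := by
    by_cases hc : c.toNat < (b.getD r.toNat []).length
    · apply pv_set_same
      rw [List.getD_eq_getElem?_getD, List.getElem?_eq_getElem hc, Option.getD_some]
      rw [List.getD_eq_getElem?_getD, List.getElem?_eq_getElem hc, Option.getD_some] at hv
      exact hv
    · exact List.set_eq_of_length_le (by omega)
  rw [hrow]
  apply pv_set_same
  by_cases hr : r.toNat < b.length
  · rw [List.getD_eq_getElem?_getD, List.getElem?_eq_getElem hr, Option.getD_some,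
      List.getD_eq_getElem?_getD, List.getElem?_eq_getElem hr, Option.getD_some]
  · rw [List.getD_eq_getElem?_getD, List.getElem?_eq_none (by omega), Option.getD_none]

theorem pv_set2_comm (b : List (List Int)) (r c r' c' v : Int) :
    pvSet2 (pvSet2 b r c v) r' c' v = pvSet2 (pvSet2 b r' c' v) r c v := by
  unfold pvSet2
  by_cases hr : r.toNat = r'.toNat
  · rw [hr]
    by_cases hl : r'.toNat < b.length
    · rw [pv_getD_set_self _ _ _ _ hl, pv_getD_set_self _ _ _ _ hl,
        List.set_set, List.set_set]
      congr 1
      by_cases hcc : c.toNat = c'.toNat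
      · rw [hcc]
      · rw [List.set_comm _ _ hcc]
    · have hb : ∀ row : List Int, b.set r'.toNat row = b :=
        fun row => List.set_eq_of_length_le (by omega)
      simp only [hb]
  · rw [pv_getD_set_ne _ _ _ _ _ hr, pv_getD_set_ne _ _ _ _ _ (Ne.symm hr),
      List.set_comm _ _ hr]

-- pvFlip basics
theorem pv_flip_cons (p1 : Int) (b : List (List Int)) (e : Int × Int) (fs : List (Int × Int)) :
    pvFlip p1 b (e :: fs) = pvFlip p1 (pvSet2 b e.1 e.2 p1) fs := rfl

theorem pv_flip_append_singleton (p1 : Int) (b : List (List Int)) (fs : List (Int × Int))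
    (e : Int × Int) : pvFlip p1 b (fs ++ [e]) = pvSet2 (pvFlip p1 b fs) e.1 e.2 p1 := by
  unfold pvFlip
  rw [List.foldl_append]
  rfl

theorem pv_flip_set2_comm (p1 : Int) (fs : List (Int × Int)) :
    ∀ (b : List (List Int)) (r c : Int),
    pvFlip p1 (pvSet2 b r c p1) fs = pvSet2 (pvFlip p1 b fs) r c p1 := by
  induction fs with
  | nil => intro b r c; rfl
  | cons e fs ih =>
    intro b r c
    rw [pv_flip_cons, pv_set2_comm]
    exact ih _ _ _

theorem pv_get2_flip_ne (p1 : Int) (fs : List (Int × Int)) :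
    ∀ (b : List (List Int)) (r c : Int),
    (∀ e ∈ fs, e.1.toNat ≠ r.toNat ∨ e.2.toNat ≠ c.toNat) →
    pvGet2 (pvFlip p1 b fs) r c = pvGet2 b r c := by
  induction fs with
  | nil => intro b r c _; rfl
  | cons e fs ih =>
    intro b r c h
    rw [pv_flip_cons, ih _ _ _ (fun e' he' => h e' (List.mem_cons_of_mem _ he')),
      pv_get2_set2_ne _ _ _ _ _ _ (h e List.mem_cons_self)]

-- coordinates along a non-zero direction are pairwise distinct (as in-range cells)
theorem pv_coord_ne (y x dy dx i j : Int) (hd : ¬(dy = 0 ∧ dx = 0)) (hij : i ≠ j)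
    (h1 : 0 ≤ y + i * dy) (h2 : y + i * dy < 8) (h3 : 0 ≤ x + i * dx) (h4 : x + i * dx < 8)
    (h5 : 0 ≤ y + j * dy) (h6 : y + j * dy < 8) (h7 : 0 ≤ x + j * dx) (h8 : x + j * dx < 8) :
    (y + i * dy).toNat ≠ (y + j * dy).toNat ∨ (x + i * dx).toNat ≠ (x + j * dx).toNat := by
  rw [not_and_or] at hd
  rcases hd with hd | hd
  · left
    have : i * dy ≠ j * dy := fun h => hij (mul_right_cancel₀ hd h)
    omega
  · right
    have : i * dx ≠ j * dx := fun h => hij (mul_right_cancel₀ hd h)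
    omega

-- the backward repaint pass equals flipping the forward-accumulated coordinates
theorem pv_back_eq (y x dy dx p1 p2 : Int) (hd : ¬(dy = 0 ∧ dx = 0)) :
    ∀ (n : Nat) (b : List (List Int)),
    (∀ i : Int, 1 ≤ i → i ≤ (n : Int) →
      pvGet2 b (y + i * dy) (x + i * dx) = p2 ∧
      (0 ≤ y + i * dy ∧ y + i * dy < 8) ∧ (0 ≤ x + i * dx ∧ x + i * dx < 8)) →
    pvBackA y x dy dx p1 p2 b (PySem.List.pyRange (n : Int) 0 (-1)) =
      pvFlip p1 b ((PySem.List.pyRange 1 ((n : Int) + 1) 1).map (fun i => (y + i * dy, x + i * dx))) := by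
  intro n
  induction n with
  | zero =>
    intro b _
    rw [show ((0 : Nat) : Int) = 0 from rfl, PySem.List.pyRange_neg_one_eq_nil le_rfl,
      show PySem.List.pyRange 1 ((0 : Int) + 1) 1 = [] from
        PySem.List.pyRange_one_eq_nil (by norm_num)]
    rfl
  | succ n ih =>
    intro b hch
    have hcast : ((n + 1 : Nat) : Int) = (n : Int) + 1 := by push_cast; ring
    rw [hcast, PySem.List.pyRange_neg_one_cons (by omega)]
    have hstep := hch ((n : Int) + 1) (by omega) (by omega)
    unfold pvBackA
    rw [List.foldl_cons, if_pos hstep.1]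
    have hch' : ∀ i : Int, 1 ≤ i → i ≤ (n : Int) →
        pvGet2 (pvSet2 b (y + ((n : Int) + 1) * dy) (x + ((n : Int) + 1) * dx) p1)
          (y + i * dy) (x + i * dx) = p2 ∧
        (0 ≤ y + i * dy ∧ y + i * dy < 8) ∧ (0 ≤ x + i * dx ∧ x + i * dx < 8) := by
      intro i hi1 hi2
      have h := hch i hi1 (by omega)
      refine ⟨?_, h.2⟩
      rw [pv_get2_set2_ne]
      · exact h.1
      · exact pv_coord_ne y x dy dx ((n : Int) + 1) i hd (by omega)
          hstep.2.1.1 hstep.2.1.2 hstep.2.2.1 hstep.2.2.2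
          h.2.1.1 h.2.1.2 h.2.2.1 h.2.2.2
    have := ih (pvSet2 b (y + ((n : Int) + 1) * dy) (x + ((n : Int) + 1) * dx) p1) hch'
    unfold pvBackA at this
    rw [show (n : Int) + 1 - 1 = (n : Int) by ring, this, pv_flip_set2_comm,
      PySem.List.pyRange_one_succ_right (a := 1) (b := (n : Int) + 1) (by omega),
      List.map_append, List.map_cons, List.map_nil, pv_flip_append_singleton]

-- every coordinate the scan emits comes from toFlip or is an in-range ray cell of the scanned depths
theorem pv_scan_mem (b : List (List Int)) (y x dy dx p1 p2 : Int) :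
    ∀ (ds : List Int) (toFlip : List (Int × Int)) (e : Int × Int),
    e ∈ pvScanB b y x dy dx p1 p2 toFlip ds →
    e ∈ toFlip ∨ ∃ i : Int, i ∈ ds ∧ e = (y + i * dy, x + i * dx) ∧
      (0 ≤ y + i * dy ∧ y + i * dy < 8) ∧ (0 ≤ x + i * dx ∧ x + i * dx < 8) := by
  intro ds
  induction ds with
  | nil => intro toFlip e he; simp [pvScanB] at he
  | cons d rest ih =>
    intro toFlip e he
    unfold pvScanB at he
    split at he
    · rename_i hin
      split at he
      · rcases ih _ _ he with h | ⟨i, hi, h⟩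
        · rcases List.mem_append.1 h with h | h
          · exact Or.inl h
          · exact Or.inr ⟨d, List.mem_cons_self, by simpa using h, hin.1, hin.2⟩
        · exact Or.inr ⟨i, List.mem_cons_of_mem _ hi, h⟩
      · split at he
        · exact Or.inl he
        · simp at he
    · simp at he

-- the heart: A's depth loop from depth k ≥ 1 equals flipping B's forward scan
theorem pv_dir_eq (y x dy dx p1 p2 : Int) (hd : ¬(dy = 0 ∧ dx = 0)) :
    ∀ (n k : Nat), k + n = 8 → 1 ≤ k → ∀ (b : List (List Int)) (valid : Int),
    ((valid = 1) ↔ 2 ≤ k) →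
    (∀ i : Int, 1 ≤ i → i < (k : Int) →
      pvGet2 b (y + i * dy) (x + i * dx) = p2 ∧
      (0 ≤ y + i * dy ∧ y + i * dy < 8) ∧ (0 ≤ x + i * dx ∧ x + i * dx < 8)) →
    pvInnerA y x dy dx p1 p2 (PySem.List.pyRange (k : Int) 8 1) valid b =
      pvFlip p1 b (pvScanB b y x dy dx p1 p2
        ((PySem.List.pyRange 1 (k : Int) 1).map (fun i => (y + i * dy, x + i * dx)))
        (PySem.List.pyRange (k : Int) 8 1)) := by
  intro n
  induction n with
  | zero =>
    intro k hk _ b valid _ _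
    rw [PySem.List.pyRange_one_eq_nil (a := (k : Int)) (b := 8) (by omega)]
    rfl
  | succ n ih =>
    intro k hk hk1 b valid hv hch
    have hklt : (k : Int) < 8 := by omega
    rw [PySem.List.pyRange_one_cons hklt]
    unfold pvInnerA pvScanB
    by_cases hin : (0 ≤ y + (k : Int) * dy ∧ y + (k : Int) * dy < 8) ∧
        (0 ≤ x + (k : Int) * dx ∧ x + (k : Int) * dx < 8)
    · rw [if_pos (by constructor <;> constructor <;> omega), if_pos hin]
      by_cases hc2 : pvGet2 b (y + (k : Int) * dy) (x + (k : Int) * dx) = p2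
      · rw [if_pos hc2, if_pos hc2]
        have hmap : (PySem.List.pyRange 1 (k : Int) 1).map (fun i => (y + i * dy, x + i * dx)) ++
            [(y + (k : Int) * dy, x + (k : Int) * dx)] =
            (PySem.List.pyRange 1 ((k + 1 : Nat) : Int) 1).map (fun i => (y + i * dy, x + i * dx)) := by
          rw [show ((k + 1 : Nat) : Int) = (k : Int) + 1 by push_cast; ring,
            PySem.List.pyRange_one_succ_right (by omega), List.map_append]
          rfl
        rw [hmap, show (k : Int) + 1 = ((k + 1 : Nat) : Int) by push_cast; ring]
        apply ih (k + 1) (by omega) (by omega)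
        · constructor
          · intro _; omega
          · intro _; rfl
        · intro i hi1 hi2
          by_cases hik : i = (k : Int)
          · subst hik; exact ⟨hc2, hin⟩
          · exact hch i hi1 (by push_cast at hi2; omega)
      · rw [if_neg hc2, if_neg hc2]
        have hflipne : ((PySem.List.pyRange 1 (k : Int) 1).map
            (fun i => (y + i * dy, x + i * dx)) ≠ []) ↔ 2 ≤ k := by
          constructor
          · intro h
            by_contra hlt
            rw [PySem.List.pyRange_one_eq_nil (by omega)] at h
            simp at h
          · intro h
            rw [PySem.List.pyRange_one_cons (by omega)]
            simp
        by_cases hterm : pvGet2 b (y + (k : Int) * dy) (x + (k : Int) * dx) = p1 ∧ valid = 1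
        · rw [if_pos hterm, if_pos ⟨hterm.1, hflipne.2 (hv.1 hterm.2)⟩]
          have hk1' : ((k : Int) - 1) = ((k - 1 : Nat) : Int) := by omega
          rw [hk1']
          rw [pv_back_eq y x dy dx p1 p2 hd (k - 1) b ?hch]
          · rw [show ((k - 1 : Nat) : Int) + 1 = (k : Int) by omega]
          · intro i hi1 hi2
            exact hch i hi1 (by omega)
        · rw [if_neg hterm, if_neg (show ¬((k : Int) = 0) by omega), if_neg (by
            intro hcon
            exact hterm ⟨hcon.1, hv.2 (hflipne.1 hcon.2)⟩)]
          rfl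
    · rw [if_neg (by
        intro hcon
        apply hin
        constructor <;> constructor <;> omega), if_neg hin]
      rfl

-- head-step unfoldings (definitional)
theorem pv_innerA_cons (y x dy dx p1 p2 d : Int) (rest : List Int) (valid : Int)
    (b : List (List Int)) :
    pvInnerA y x dy dx p1 p2 (d :: rest) valid b =
      if ((-1 < x + d * dx ∧ x + d * dx < 8) ∧ (-1 < y + d * dy ∧ y + d * dy < 8)) then
        if pvGet2 b (y + d * dy) (x + d * dx) = p2 then
          pvInnerA y x dy dx p1 p2 rest 1 b
        else if pvGet2 b (y + d * dy) (x + d * dx) = p1 ∧ valid = 1 then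
          pvBackA y x dy dx p1 p2 b (PySem.List.pyRange (d - 1) 0 (-1))
        else if d = 0 then
          pvInnerA y x dy dx p1 p2 rest valid (pvSet2 b (y + d * dy) (x + d * dx) p1)
        else b
      else b := rfl

theorem pyR08 : PySem.List.pyRange 0 8 1 = [0, 1, 2, 3, 4, 5, 6, 7] := by decide
theorem pyR18 : PySem.List.pyRange 1 8 1 = [1, 2, 3, 4, 5, 6, 7] := by decide

-- the per-direction step functions of the two ports
def pvStepA (y x p1 p2 dy dx : Int) (b : List (List Int)) : List (List Int) :=
  pvInnerA y x dy dx p1 p2 (PySem.List.pyRange 0 8 1) 0 b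

def pvStepB (y x p1 p2 : Int) (b : List (List Int)) (dd : Int × Int) : List (List Int) :=
  pvFlip p1 b (pvScanB b y x dd.1 dd.2 p1 p2 [] (PySem.List.pyRange 1 8 1))

theorem pv_A_pairs (board : List (List Int)) (y x p1 p2 : Int) :
    repaint_the_cells board y x p1 p2 =
      pvDirs.foldl (fun b dd => pvStepA y x p1 p2 dd.1 dd.2 b) board := by
  unfold repaint_the_cells pvStepA pvDirs
  rw [pyR08]
  norm_num [List.foldl,
    show PySem.List.pyGetD pvDirY 0 0 = 1 from by decide,
    show PySem.List.pyGetD pvDirY 1 0 = 1 from by decide,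
    show PySem.List.pyGetD pvDirY 2 0 = 0 from by decide,
    show PySem.List.pyGetD pvDirY 3 0 = -1 from by decide,
    show PySem.List.pyGetD pvDirY 4 0 = -1 from by decide,
    show PySem.List.pyGetD pvDirY 5 0 = -1 from by decide,
    show PySem.List.pyGetD pvDirY 6 0 = 0 from by decide,
    show PySem.List.pyGetD pvDirY 7 0 = 1 from by decide,
    show PySem.List.pyGetD pvDirX 0 0 = 0 from by decide,
    show PySem.List.pyGetD pvDirX 1 0 = 1 from by decide,
    show PySem.List.pyGetD pvDirX 2 0 = 1 from by decide,
    show PySem.List.pyGetD pvDirX 3 0 = 1 from by decide,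
    show PySem.List.pyGetD pvDirX 4 0 = 0 from by decide,
    show PySem.List.pyGetD pvDirX 5 0 = -1 from by decide,
    show PySem.List.pyGetD pvDirX 6 0 = -1 from by decide,
    show PySem.List.pyGetD pvDirX 7 0 = -1 from by decide]

theorem pv_B_def (board : List (List Int)) (y x p1 p2 : Int) :
    repaint_the_cells_alt board y x p1 p2 =
      if (0 ≤ y ∧ y < 8) ∧ (0 ≤ x ∧ x < 8) then
        pvDirs.foldl (pvStepB y x p1 p2) (pvSet2 board y x p1)
      else board := rfl

-- === the p1 = p2 degenerate colour case: neither program ever captures ===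
theorem pv_scan_p1p2 (b : List (List Int)) (y x dy dx p1 p2 : Int)
    (hp : p1 = p2) : ∀ (ds : List Int) (toFlip : List (Int × Int)),
    pvScanB b y x dy dx p1 p2 toFlip ds = [] := by
  intro ds
  induction ds with
  | nil => intro toFlip; rfl
  | cons d rest ih =>
    intro toFlip
    unfold pvScanB
    split
    · split
      · exact ih _
      · split
        · rename_i h1 h2
          exact absurd (hp ▸ h2.1) h1
        · rfl
    · rfl

theorem pv_innerA_noop (y x dy dx p1 p2 : Int) (hp : p1 = p2) :
    ∀ (ds : List Int), (∀ d ∈ ds, d ≠ (0 : Int)) → ∀ (valid : Int) (b : List (List Int)),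
    pvInnerA y x dy dx p1 p2 ds valid b = b := by
  intro ds
  induction ds with
  | nil => intro _ valid b; rfl
  | cons d rest ih =>
    intro hd0 valid b
    rw [pv_innerA_cons]
    split
    · split
      · exact ih (fun e he => hd0 e (List.mem_cons_of_mem _ he)) _ _
      · split
        · rename_i h1 h2
          exact absurd (hp ▸ h2.1) h1
        · split
          · rename_i hd
            exact absurd hd (hd0 d List.mem_cons_self)
          · rfl
    · rfl

theorem pv_stepA_p1p2 (y x p1 p2 dy dx : Int) (hp : p1 = p2)
    (hin : (0 ≤ y ∧ y < 8) ∧ (0 ≤ x ∧ x < 8)) (b : List (List Int)) :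
    pvStepA y x p1 p2 dy dx b = if pvGet2 b y x = p2 then b else pvSet2 b y x p1 := by
  unfold pvStepA
  rw [pyR08, pv_innerA_cons]
  simp only [zero_mul, add_zero]
  rw [if_pos (by refine ⟨⟨?_, ?_⟩, ?_, ?_⟩ <;> omega)]
  have htail : ∀ d ∈ [1, 2, 3, 4, 5, 6, 7], d ≠ (0 : Int) := by decide
  split
  · exact pv_innerA_noop y x dy dx p1 p2 hp _ htail _ _
  · rw [if_neg (by rintro ⟨-, h⟩; norm_num at h), if_pos (by trivial)]
    exact pv_innerA_noop y x dy dx p1 p2 hp _ htail _ _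

theorem pv_foldB_p1p2 (y x p1 p2 : Int) (hp : p1 = p2) :
    ∀ (dirs : List (Int × Int)) (b : List (List Int)),
    dirs.foldl (pvStepB y x p1 p2) b = b := by
  intro dirs
  induction dirs with
  | nil => intro b; rfl
  | cons dd rest ih =>
    intro b
    rw [List.foldl_cons, show pvStepB y x p1 p2 b dd = b by
      unfold pvStepB
      rw [pv_scan_p1p2 _ _ _ _ _ _ _ hp]
      rfl]
    exact ih b

theorem pv_foldA_p1p2 (y x p1 p2 : Int) (hp : p1 = p2)
    (hin : (0 ≤ y ∧ y < 8) ∧ (0 ≤ x ∧ x < 8)) :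
    ∀ (dirs : List (Int × Int)) (b : List (List Int)), pvGet2 b y x = p2 →
    dirs.foldl (fun b dd => pvStepA y x p1 p2 dd.1 dd.2 b) b = b := by
  intro dirs
  induction dirs with
  | nil => intro b _; rfl
  | cons dd rest ih =>
    intro b horg
    rw [List.foldl_cons]
    rw [pv_stepA_p1p2 _ _ _ _ _ _ hp hin, if_pos horg]
    exact ih b horg

-- === out-of-range placement: both programs leave the board unchanged ===
theorem pv_stepA_out (y x p1 p2 dy dx : Int)
    (hin : ¬((0 ≤ y ∧ y < 8) ∧ (0 ≤ x ∧ x < 8))) (b : List (List Int)) :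
    pvStepA y x p1 p2 dy dx b = b := by
  unfold pvStepA
  rw [pyR08, pv_innerA_cons]
  simp only [zero_mul, add_zero]
  rw [if_neg (by omega)]

theorem pv_foldA_out (y x p1 p2 : Int)
    (hin : ¬((0 ≤ y ∧ y < 8) ∧ (0 ≤ x ∧ x < 8))) :
    ∀ (dirs : List (Int × Int)) (b : List (List Int)),
    dirs.foldl (fun b dd => pvStepA y x p1 p2 dd.1 dd.2 b) b = b := by
  intro dirs
  induction dirs with
  | nil => intro b; rfl
  | cons dd rest ih =>
    intro b
    rw [List.foldl_cons]
    rw [pv_stepA_out _ _ _ _ _ _ hin]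
    exact ih b

-- === the main colour case p1 ≠ p2, placed square not held by p2: step of A equals step of B ===
theorem pv_step_first (y x p1 p2 dy dx : Int) (hd : ¬(dy = 0 ∧ dx = 0))
    (hin : (0 ≤ y ∧ y < 8) ∧ (0 ≤ x ∧ x < 8)) (b : List (List Int))
    (horg : ¬pvGet2 b y x = p2) :
    pvStepA y x p1 p2 dy dx b = pvStepB y x p1 p2 (pvSet2 b y x p1) (dy, dx) := by
  unfold pvStepA
  rw [pyR08, pv_innerA_cons]
  simp only [zero_mul, add_zero]
  rw [if_pos (by refine ⟨⟨?_, ?_⟩, ?_, ?_⟩ <;> omega), if_neg horg,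
    if_neg (by rintro ⟨-, h⟩; norm_num at h), if_pos (by trivial), ← pyR18]
  have h := pv_dir_eq y x dy dx p1 p2 hd 7 1 rfl (by omega) (pvSet2 b y x p1) 0
    (by norm_num) (by intro i h1 h2; norm_num at h2; omega)
  norm_num [PySem.List.pyRange_one_eq_nil] at h
  unfold pvStepB
  exact h

theorem pv_step_later (y x p1 p2 dy dx : Int) (hp : p1 ≠ p2) (hd : ¬(dy = 0 ∧ dx = 0))
    (hin : (0 ≤ y ∧ y < 8) ∧ (0 ≤ x ∧ x < 8)) (b : List (List Int))
    (horg : pvGet2 b y x = p1) :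
    pvStepA y x p1 p2 dy dx b = pvStepB y x p1 p2 b (dy, dx) := by
  unfold pvStepA
  rw [pyR08, pv_innerA_cons]
  simp only [zero_mul, add_zero]
  rw [if_pos (by refine ⟨⟨?_, ?_⟩, ?_, ?_⟩ <;> omega), if_neg (by rw [horg]; exact hp),
    if_neg (by rintro ⟨-, h⟩; norm_num at h), if_pos (by trivial),
    pv_set2_same b y x p1 horg, ← pyR18]
  have h := pv_dir_eq y x dy dx p1 p2 hd 7 1 rfl (by omega) b 0
    (by norm_num) (by intro i h1 h2; norm_num at h2; omega)
  norm_num [PySem.List.pyRange_one_eq_nil] at h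
  unfold pvStepB
  exact h

-- one B step never touches the placed cell (y, x)
theorem pv_origin_stepB (y x p1 p2 : Int) (dd : Int × Int)
    (b : List (List Int)) (hd : ¬(dd.1 = 0 ∧ dd.2 = 0))
    (hin : (0 ≤ y ∧ y < 8) ∧ (0 ≤ x ∧ x < 8)) :
    pvGet2 (pvStepB y x p1 p2 b dd) y x = pvGet2 b y x := by
  unfold pvStepB
  apply pv_get2_flip_ne
  intro e he
  rcases pv_scan_mem b y x dd.1 dd.2 p1 p2 _ _ e he with h | ⟨i, hi, he', hb1, hb2⟩
  · simp at h
  · rw [PySem.List.mem_pyRange_one] at hi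
    have h0y : y + (0 : Int) * dd.1 = y := by ring
    have h0x : x + (0 : Int) * dd.2 = x := by ring
    have hne := pv_coord_ne y x dd.1 dd.2 i 0 hd (by omega)
      hb1.1 hb1.2 hb2.1 hb2.2
      (by rw [h0y]; exact hin.1.1) (by rw [h0y]; exact hin.1.2)
      (by rw [h0x]; exact hin.2.1) (by rw [h0x]; exact hin.2.2)
    rw [h0y, h0x] at hne
    rw [he']
    exact hne

-- chaining the 8 directions, A's steps against B's, under the origin invariant
theorem pv_chain (y x p1 p2 : Int) (hp : p1 ≠ p2)
    (hin : (0 ≤ y ∧ y < 8) ∧ (0 ≤ x ∧ x < 8)) :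
    ∀ (dirs : List (Int × Int)), (∀ dd ∈ dirs, ¬(dd.1 = 0 ∧ dd.2 = 0)) →
    ∀ (b : List (List Int)), pvGet2 b y x = p1 →
    dirs.foldl (fun b dd => pvStepA y x p1 p2 dd.1 dd.2 b) b =
      dirs.foldl (pvStepB y x p1 p2) b := by
  intro dirs
  induction dirs with
  | nil => intro _ b _; rfl
  | cons dd rest ih =>
    intro hdz b horg
    have hd : ¬(dd.1 = 0 ∧ dd.2 = 0) := hdz dd List.mem_cons_self
    rw [List.foldl_cons, List.foldl_cons,
      pv_step_later y x p1 p2 dd.1 dd.2 hp hd hin b horg]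
    exact ih (fun e he => hdz e (List.mem_cons_of_mem _ he)) _
      (by rw [pv_origin_stepB y x p1 p2 dd b hd hin]; exact horg)

-- === tightness: inside D_, A keeps p2 at the placed square while B has p1 there ===
-- membership in a countdown range
theorem pv_mem_pyRange_neg (n : Nat) :
    ∀ h : Int, h ∈ PySem.List.pyRange (n : Int) 0 (-1) → 1 ≤ h ∧ h ≤ (n : Int) := by
  induction n with
  | zero =>
    intro h hm
    rw [show ((0 : Nat) : Int) = 0 from rfl, PySem.List.pyRange_neg_one_eq_nil le_rfl] at hm
    simp at hm
  | succ n ih =>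
    intro h hm
    rw [show ((n + 1 : Nat) : Int) = (n : Int) + 1 by push_cast; ring,
      PySem.List.pyRange_neg_one_cons (by omega)] at hm
    rcases List.mem_cons.1 hm with rfl | hm
    · omega
    · rw [show (n : Int) + 1 - 1 = (n : Int) by ring] at hm
      have := ih h hm
      omega

-- the backward pass never touches the placed square
theorem pv_backA_origin (y x dy dx p1 p2 : Int) (hd : ¬(dy = 0 ∧ dx = 0))
    (hin : (0 ≤ y ∧ y < 8) ∧ (0 ≤ x ∧ x < 8)) :
    ∀ (hs : List Int) (b : List (List Int)),
    (∀ h ∈ hs, 1 ≤ h ∧ (0 ≤ y + h * dy ∧ y + h * dy < 8) ∧ (0 ≤ x + h * dx ∧ x + h * dx < 8)) →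
    pvGet2 (pvBackA y x dy dx p1 p2 b hs) y x = pvGet2 b y x := by
  intro hs
  induction hs with
  | nil => intro b _; rfl
  | cons h rest ih =>
    intro b hh
    have hc := hh h List.mem_cons_self
    have hne : (y + h * dy).toNat ≠ y.toNat ∨ (x + h * dx).toNat ≠ x.toNat := by
      have h0y : y + (0 : Int) * dy = y := by ring
      have h0x : x + (0 : Int) * dx = x := by ring
      have := pv_coord_ne y x dy dx h 0 hd (by omega)
        hc.2.1.1 hc.2.1.2 hc.2.2.1 hc.2.2.2
        (by rw [h0y]; exact hin.1.1) (by rw [h0y]; exact hin.1.2)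
        (by rw [h0x]; exact hin.2.1) (by rw [h0x]; exact hin.2.2)
      rw [h0y, h0x] at this
      exact this
    unfold pvBackA
    rw [List.foldl_cons]
    split
    · rw [show (rest.foldl (fun b h =>
          if pvGet2 b (y + h * dy) (x + h * dx) = p2 then pvSet2 b (y + h * dy) (x + h * dx) p1 else b)
          (pvSet2 b (y + h * dy) (x + h * dx) p1)) =
          pvBackA y x dy dx p1 p2 (pvSet2 b (y + h * dy) (x + h * dx) p1) rest from rfl,
        ih _ (fun e he => hh e (List.mem_cons_of_mem _ he)),
        pv_get2_set2_ne _ _ _ _ _ _ hne]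
    · exact ih _ (fun e he => hh e (List.mem_cons_of_mem _ he))

-- the ray is convex: intermediate depths of an in-range depth stay in range
theorem pv_ray_convex (c dc d h : Int) (hdc : dc = 1 ∨ dc = 0 ∨ dc = -1)
    (h0 : 0 ≤ c ∧ c < 8) (hd : 0 ≤ c + d * dc ∧ c + d * dc < 8)
    (hh : 1 ≤ h ∧ h ≤ d - 1) : 0 ≤ c + h * dc ∧ c + h * dc < 8 := by
  rcases hdc with rfl | rfl | rfl <;> constructor <;> nlinarith [h0.1, h0.2, hd.1, hd.2, hh.1, hh.2]

-- A's inner loop from depth ≥ 1 never touches the placed square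
theorem pv_innerA_origin (y x dy dx p1 p2 : Int) (hd : ¬(dy = 0 ∧ dx = 0))
    (hdy : dy = 1 ∨ dy = 0 ∨ dy = -1) (hdx : dx = 1 ∨ dx = 0 ∨ dx = -1)
    (hin : (0 ≤ y ∧ y < 8) ∧ (0 ≤ x ∧ x < 8)) :
    ∀ (ds : List Int), (∀ d ∈ ds, 1 ≤ d) → ∀ (valid : Int) (b : List (List Int)),
    pvGet2 (pvInnerA y x dy dx p1 p2 ds valid b) y x = pvGet2 b y x := by
  intro ds
  induction ds with
  | nil => intro _ valid b; rfl
  | cons d rest ih =>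
    intro hd1 valid b
    have hdge : 1 ≤ d := hd1 d List.mem_cons_self
    rw [pv_innerA_cons]
    split
    · rename_i hinr
      split
      · exact ih (fun e he => hd1 e (List.mem_cons_of_mem _ he)) _ _
      · split
        · have hdnat : d = ((d - 1).toNat : Int) + 1 := by omega
          rw [show d - 1 = (((d - 1).toNat : Nat) : Int) by omega]
          apply pv_backA_origin y x dy dx p1 p2 hd hin
          intro h hm
          have hb := pv_mem_pyRange_neg (d - 1).toNat h hm
          refine ⟨hb.1, ?_, ?_⟩
          · exact pv_ray_convex y dy d h hdy hin.1 ⟨by omega, by omega⟩ ⟨hb.1, by omega⟩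
          · exact pv_ray_convex x dx d h hdx hin.2 ⟨by omega, by omega⟩ ⟨hb.1, by omega⟩
        · split
          · omega
          · rfl
    · rfl

-- one A step keeps the placed square's p2 disc
theorem pv_stepA_origin (y x p1 p2 dy dx : Int) (hd : ¬(dy = 0 ∧ dx = 0))
    (hdy : dy = 1 ∨ dy = 0 ∨ dy = -1) (hdx : dx = 1 ∨ dx = 0 ∨ dx = -1)
    (hin : (0 ≤ y ∧ y < 8) ∧ (0 ≤ x ∧ x < 8)) (b : List (List Int))
    (horg : pvGet2 b y x = p2) :
    pvGet2 (pvStepA y x p1 p2 dy dx b) y x = p2 := by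
  unfold pvStepA
  rw [pyR08, pv_innerA_cons]
  simp only [zero_mul, add_zero]
  rw [if_pos (by refine ⟨⟨?_, ?_⟩, ?_, ?_⟩ <;> omega), if_pos horg,
    pv_innerA_origin y x dy dx p1 p2 hd hdy hdx hin _ (by decide) _ _]
  exact horg

theorem pv_foldA_origin (y x p1 p2 : Int) (hin : (0 ≤ y ∧ y < 8) ∧ (0 ≤ x ∧ x < 8)) :
    ∀ (dirs : List (Int × Int)),
    (∀ dd ∈ dirs, ¬(dd.1 = 0 ∧ dd.2 = 0) ∧ (dd.1 = 1 ∨ dd.1 = 0 ∨ dd.1 = -1) ∧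
      (dd.2 = 1 ∨ dd.2 = 0 ∨ dd.2 = -1)) →
    ∀ (b : List (List Int)), pvGet2 b y x = p2 →
    pvGet2 (dirs.foldl (fun b dd => pvStepA y x p1 p2 dd.1 dd.2 b) b) y x = p2 := by
  intro dirs
  induction dirs with
  | nil => intro _ b horg; exact horg
  | cons dd rest ih =>
    intro hdd b horg
    have hc := hdd dd List.mem_cons_self
    rw [List.foldl_cons]
    exact ih (fun e he => hdd e (List.mem_cons_of_mem _ he)) _
      (pv_stepA_origin y x p1 p2 dd.1 dd.2 hc.1 hc.2.1 hc.2.2 hin b horg)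

theorem pv_foldB_origin (y x p1 p2 : Int) (hin : (0 ≤ y ∧ y < 8) ∧ (0 ≤ x ∧ x < 8)) :
    ∀ (dirs : List (Int × Int)), (∀ dd ∈ dirs, ¬(dd.1 = 0 ∧ dd.2 = 0)) →
    ∀ (b : List (List Int)), pvGet2 b y x = p1 →
    pvGet2 (dirs.foldl (pvStepB y x p1 p2) b) y x = p1 := by
  intro dirs
  induction dirs with
  | nil => intro _ b horg; exact horg
  | cons dd rest ih =>
    intro hdd b horg
    rw [List.foldl_cons]
    exact ih (fun e he => hdd e (List.mem_cons_of_mem _ he)) _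
      (by rw [pv_origin_stepB y x p1 p2 dd b (hdd dd List.mem_cons_self) hin]; exact horg)

-- bridge: D_'s option-typed cell read equals pvGet2 on a well-shaped board
theorem pv_D_cell_iff (board : List (List Int)) (y x p2 : Int)
    (hyb : y.toNat < board.length) (hxb : x.toNat < (board.getD y.toNat []).length) :
    ((board[y.toNat]?.bind fun row => row[x.toNat]?) = some p2) ↔ pvGet2 board y x = p2 := by
  have hrow : board.getD y.toNat [] = board[y.toNat] := by
    rw [List.getD_eq_getElem?_getD, List.getElem?_eq_getElem hyb, Option.getD_some]
  rw [hrow] at hxb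
  unfold pvGet2
  rw [List.getElem?_eq_getElem hyb, Option.bind_some, List.getElem?_eq_getElem hxb, hrow,
    List.getD_eq_getElem?_getD, List.getElem?_eq_getElem hxb, Option.getD_some,
    Option.some.injEq]

-- ===== VERDICT (by name: the statement is the Claim_ definition above) =====
set_option maxHeartbeats 2000000 in
theorem repaint_the_cells_spec : Claim_unchanged_repaint_the_cells := by
  intro board y x p1 p2 _ hpre
  unfold Spec_repaint_the_cells
  intro hnd
  rw [pv_A_pairs, pv_B_def]
  by_cases hin : (0 ≤ y ∧ y < 8) ∧ (0 ≤ x ∧ x < 8)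
  · rw [if_pos hin]
    have hsh : pvShape board := pvShape_of_pre board (hpre hin)
    have hyb : y.toNat < board.length := by rw [hsh.1]; omega
    have hxb : x.toNat < (board.getD y.toNat []).length := by
      rw [hsh.2 y.toNat (by omega)]; omega
    by_cases hpp : p1 = p2
    · rw [pv_foldB_p1p2 _ _ _ _ hpp]
      by_cases horg : pvGet2 board y x = p2
      · rw [pv_foldA_p1p2 _ _ _ _ hpp hin _ _ horg,
          pv_set2_same board y x p1 (by rw [horg, hpp])]
      · rw [show pvDirs = ((1, 0) : Int × Int) ::
            [(1, 1), (0, 1), (-1, 1), (-1, 0), (-1, -1), (0, -1), (1, -1)] from rfl,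
          List.foldl_cons, pv_stepA_p1p2 _ _ _ _ _ _ hpp hin, if_neg horg]
        exact pv_foldA_p1p2 _ _ _ _ hpp hin _ _
          (by rw [pv_get2_set2_self board y x p1 hyb hxb]; exact hpp)
    · have horg : ¬pvGet2 board y x = p2 := by
        intro h
        exact hnd ⟨hin.1.1, by omega, hin.2.1, by omega, hpp,
          (pv_D_cell_iff board y x p2 hyb hxb).2 h⟩
      show List.foldl (fun b dd => pvStepA y x p1 p2 dd.1 dd.2 b) board pvDirs =
        List.foldl (pvStepB y x p1 p2) (pvSet2 board y x p1) pvDirs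
      rw [show pvDirs = ((1, 0) : Int × Int) ::
          [(1, 1), (0, 1), (-1, 1), (-1, 0), (-1, -1), (0, -1), (1, -1)] from rfl,
        List.foldl_cons, List.foldl_cons]
      show List.foldl (fun b dd => pvStepA y x p1 p2 dd.1 dd.2 b)
          (pvStepA y x p1 p2 1 0 board)
          [(1, 1), (0, 1), (-1, 1), (-1, 0), (-1, -1), (0, -1), (1, -1)] =
        List.foldl (pvStepB y x p1 p2)
          (pvStepB y x p1 p2 (pvSet2 board y x p1) (1, 0))
          [(1, 1), (0, 1), (-1, 1), (-1, 0), (-1, -1), (0, -1), (1, -1)]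
      rw [pv_step_first y x p1 p2 1 0 (by norm_num) hin board horg]
      refine pv_chain y x p1 p2 hpp hin
        [(1, 1), (0, 1), (-1, 1), (-1, 0), (-1, -1), (0, -1), (1, -1)] (by decide)
        (pvStepB y x p1 p2 (pvSet2 board y x p1) (1, 0)) ?_
      rw [pv_origin_stepB y x p1 p2 ((1 : Int), (0 : Int)) (pvSet2 board y x p1)
          (by norm_num) hin]
      exact pv_get2_set2_self board y x p1 hyb hxb
  · rw [if_neg hin, pv_foldA_out _ _ _ _ hin]

set_option maxHeartbeats 4000000 in
theorem repaint_the_cells_changed : Claim_changed_repaint_the_cells := by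
  unfold Claim_changed_repaint_the_cells; decide

theorem repaint_the_cells_tight : Claim_exact_repaint_the_cells := by
  intro board y x p1 p2 _ hpre hD heq
  obtain ⟨hy0, hy7, hx0, hx7, hpp, hcell⟩ := hD
  have hin : (0 ≤ y ∧ y < 8) ∧ (0 ≤ x ∧ x < 8) := ⟨⟨hy0, by omega⟩, hx0, by omega⟩
  have hsh : pvShape board := pvShape_of_pre board (hpre hin)
  have hyb : y.toNat < board.length := by rw [hsh.1]; omega
  have hxb : x.toNat < (board.getD y.toNat []).length := by
    rw [hsh.2 y.toNat (by omega)]; omega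
  have horg' : pvGet2 board y x = p2 := (pv_D_cell_iff board y x p2 hyb hxb).1 hcell
  have hA : pvGet2 (repaint_the_cells board y x p1 p2) y x = p2 := by
    rw [pv_A_pairs]
    exact pv_foldA_origin y x p1 p2 hin pvDirs (by decide) board horg'
  have hB : pvGet2 (repaint_the_cells_alt board y x p1 p2) y x = p1 := by
    rw [pv_B_def, if_pos hin]
    exact pv_foldB_origin y x p1 p2 hin pvDirs (by decide) _
      (pv_get2_set2_self board y x p1 hyb hxb)
  rw [heq, hB] at hA
  exact hpp hA
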